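-- pv_equiv track=rewrite | github.com/rock-hu/minor-projects | openharmony/arkcompiler_runtime_core/taihe/compiler/taihe/parse/convert.py | normalize_pkg_name
-- ===== SOURCE A (Python) =====
-- def normalize_pkg_name(name: str):
--     def is_allowed(char: str):
--         return char.isalnum() or char == "_"
--
--     def to_valid_identifier(s: str):
--         """Converts a string to valid, C-style identifier."""
--         # First, remove all non-alphanumeric characters, excluding "_".
--         s = "".join(char for char in s if is_allowed(char))
--         # Next, ensure that the segment doesn't begin with a digit.
--         if s and s[0].isnumeric():
--             # If so, we inject "_" in the beginning.
--             s = "_" + s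
--         return s
--
--     # First, split the package name into segments.
--     segments = name.split(".")
--     # Next, make sure that each segment is valid.
--     translated_segments = (to_valid_identifier(s) for s in segments)
--     # Finally, reconstruct the package name.
--     return ".".join(s for s in translated_segments if s)
-- ===== SOURCE B (Python) =====
-- def normalize_pkg_name(name: str):
--     def finalize(buf):
--         s = "".join(buf)
--         if s and s[0].isnumeric():
--             return "_" + s
--         return s
--
--     out = []
--     buf = []
--     for ch in name:
--         if ch == ".":
--             seg = finalize(buf)
--             if seg:
--                 out.append(seg)
--             buf = []
--         elif ch.isalnum() or ch == "_":
--             buf.append(ch)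
--     seg = finalize(buf)
--     if seg:
--         out.append(seg)
--     return ".".join(out)
-- ===== Notes on version B (the rewrite author's own statement) =====
-- stated objective: alternative
-- what changed: Replaces split-into-segments + per-segment filter/fix + join-of-nonempty with a single pass over the characters maintaining a current-segment buffer and an output list, finalizing the buffer at each dot and at the end.
import Mathlib
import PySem

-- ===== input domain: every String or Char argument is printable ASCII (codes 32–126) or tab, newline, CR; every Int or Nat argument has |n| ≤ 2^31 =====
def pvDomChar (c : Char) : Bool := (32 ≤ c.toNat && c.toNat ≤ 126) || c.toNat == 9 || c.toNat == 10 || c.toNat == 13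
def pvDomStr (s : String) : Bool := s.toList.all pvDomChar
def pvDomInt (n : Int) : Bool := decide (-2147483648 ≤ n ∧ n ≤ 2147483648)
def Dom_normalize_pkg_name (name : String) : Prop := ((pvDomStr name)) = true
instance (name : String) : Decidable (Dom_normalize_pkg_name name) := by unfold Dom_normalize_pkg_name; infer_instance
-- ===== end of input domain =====

-- B replaces split + per-segment cleanup + join with a single pass keeping a segment buffer; same result, same cost.

-- ===== PORT A =====
-- is_allowed: char.isalnum() or char == "_"
def pvAllowed (c : Char) : Bool := PySem.Chars.isalnum c || (c == '_')

-- to_valid_identifier; str.isnumeric is ported as Chars.isdigit (exact on the ASCII domain)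
def pvToValidIdentifier (s : List Char) : List Char :=
  let f := s.filter pvAllowed
  match f with
  | [] => f
  | c :: _ => if PySem.Chars.isdigit c then '_' :: f else f

def normalize_pkg_name (name : String) : String :=
  let segments := PySem.Chars.splitOn name.toList ['.']
  let translated := segments.map pvToValidIdentifier
  String.ofList (PySem.Chars.join ['.'] (translated.filter (fun s => !s.isEmpty)))

-- ===== PORT B =====
-- finalize: prepend '_' when the (already filtered) buffer starts with a digit (isnumeric on ASCII)
def pvFinalize (buf : List Char) : List Char :=
  match buf with
  | [] => buf
  | c :: _ => if PySem.Chars.isdigit c then '_' :: buf else buf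

-- one loop step: on '.' flush the buffer, otherwise keep the char only if allowed
def pvStep (st : List (List Char) × List Char) (c : Char) : List (List Char) × List Char :=
  if c == '.' then
    let seg := pvFinalize st.2
    (if seg.isEmpty then st.1 else st.1 ++ [seg], [])
  else if pvAllowed c then (st.1, st.2 ++ [c]) else st

def normalize_pkg_name_alt (name : String) : String :=
  let p := name.toList.foldl pvStep ([], [])
  let seg := pvFinalize p.2
  String.ofList (PySem.Chars.join ['.'] (if seg.isEmpty then p.1 else p.1 ++ [seg]))

-- ===== PRECONDITION & SPEC =====
def Spec_normalize_pkg_name (name : String) (out : String) : Prop := out = normalize_pkg_name_alt name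
instance (name : String) (out : String) : Decidable (Spec_normalize_pkg_name name out) := by unfold Spec_normalize_pkg_name; infer_instance

-- ===== CLAIM (what is proved, stated in full; the proofs are below) =====
def Claim_equal_normalize_pkg_name : Prop := ∀ (name : String), Dom_normalize_pkg_name name → Spec_normalize_pkg_name name (normalize_pkg_name name)

-- ===== LEMMAS AND PROOFS =====

/-- Structural version of splitting on '.'. -/
def pvSplit : List Char → List (List Char)
  | [] => [[]]
  | c :: rest => if c = '.' then [] :: pvSplit rest else (pvSplit rest).modifyHead (c :: ·)

theorem pv_modifyHead_id {α : Type} (L : List α) : L.modifyHead (fun x => x) = L := by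
  cases L <;> simp

theorem pv_modifyHead_comp {α : Type} (L : List α) (g h : α → α) :
    (L.modifyHead g).modifyHead h = L.modifyHead (fun x => h (g x)) := by
  cases L <;> simp

theorem pv_map_modifyHead {α β : Type} (L : List α) (f : α → β) (g : α → α) (h : β → β)
    (H : ∀ a, f (g a) = h (f a)) : (L.modifyHead g).map f = (L.map f).modifyHead h := by
  cases L <;> simp [H]

theorem pv_go_spec (fuel : Nat) : ∀ (l cur : List Char) (accs : List (List Char)),
    l.length ≤ fuel →
    PySem.Chars.splitOn.go ['.'] fuel l cur accs = accs.reverse ++ (pvSplit l).modifyHead (cur.reverse ++ ·) := by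
  induction fuel with
  | zero =>
      intro l cur accs h
      have hl : l = [] := List.eq_nil_of_length_eq_zero (Nat.le_zero.mp h)
      subst hl
      simp [PySem.Chars.splitOn.go, pvSplit]
  | succ fuel ih =>
      intro l cur accs h
      cases l with
      | nil => simp [PySem.Chars.splitOn.go, pvSplit]
      | cons c rest =>
          by_cases hc : c = '.'
          · subst hc
            rw [show PySem.Chars.splitOn.go ['.'] (fuel + 1) ('.' :: rest) cur accs
                  = PySem.Chars.splitOn.go ['.'] fuel rest [] (cur.reverse :: accs) by
                simp [PySem.Chars.splitOn.go, List.isPrefixOf]]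
            rw [ih rest [] (cur.reverse :: accs) (Nat.le_of_succ_le_succ (by simpa using h))]
            simp [pvSplit, List.modifyHead]
            cases pvSplit rest <;> rfl
          · rw [show PySem.Chars.splitOn.go ['.'] (fuel + 1) (c :: rest) cur accs
                  = PySem.Chars.splitOn.go ['.'] fuel rest (c :: cur) accs by
                simp [PySem.Chars.splitOn.go, List.isPrefixOf, (by simpa using Ne.symm hc : ('.' == c) = false)]]
            rw [ih rest (c :: cur) accs (Nat.le_of_succ_le_succ (by simpa using h))]
            rw [show pvSplit (c :: rest) = (pvSplit rest).modifyHead (c :: ·) by simp [pvSplit, hc]]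
            rw [pv_modifyHead_comp]
            simp

theorem pv_splitOn_eq (cs : List Char) : PySem.Chars.splitOn cs ['.'] = pvSplit cs := by
  rw [show PySem.Chars.splitOn cs ['.'] = PySem.Chars.splitOn.go ['.'] (cs.length + 1) cs [] [] from rfl]
  rw [pv_go_spec (cs.length + 1) cs [] [] (Nat.le_succ _)]
  simp [pv_modifyHead_id]

def pvF (bs : List (List Char)) : List (List Char) := (bs.map pvFinalize).filter (fun s => !s.isEmpty)

def pvSegs (buf : List Char) (cs : List Char) : List (List Char) :=
  ((pvSplit cs).map (List.filter pvAllowed)).modifyHead (buf ++ ·)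

def pvRes (cs : List Char) (out : List (List Char)) (buf : List Char) : List (List Char) :=
  let p := cs.foldl pvStep (out, buf)
  let seg := pvFinalize p.2
  if seg.isEmpty then p.1 else p.1 ++ [seg]

theorem pv_main (cs : List Char) : ∀ (out : List (List Char)) (buf : List Char),
    pvRes cs out buf = out ++ pvF (pvSegs buf cs) := by
  induction cs with
  | nil =>
      intro out buf
      simp only [pvRes, pvSegs, pvSplit, pvF, List.foldl_nil, List.map, List.modifyHead,
        List.append_nil, List.filter]
      cases h : (pvFinalize buf).isEmpty <;> simp_all
  | cons c rest ih =>
      intro out buf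
      by_cases hc : c = '.'
      · subst hc
        rw [show pvRes ('.' :: rest) out buf
              = pvRes rest (if (pvFinalize buf).isEmpty then out else out ++ [pvFinalize buf]) [] by
            simp [pvRes, pvStep]]
        rw [ih]
        have hsegs : pvSegs buf ('.' :: rest) = buf :: (pvSplit rest).map (List.filter pvAllowed) := by
          simp [pvSegs, pvSplit, List.modifyHead]
        have hsegs0 : pvSegs [] rest = (pvSplit rest).map (List.filter pvAllowed) := by
          simp [pvSegs, pv_modifyHead_id]
        rw [hsegs, hsegs0]
        rw [show pvF (buf :: (pvSplit rest).map (List.filter pvAllowed))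
              = (if (pvFinalize buf).isEmpty then [] else [pvFinalize buf])
                ++ pvF ((pvSplit rest).map (List.filter pvAllowed)) by
            simp only [pvF, List.map_cons, List.filter_cons]
            cases h : (pvFinalize buf).isEmpty <;> simp_all]
        cases h : (pvFinalize buf).isEmpty <;> simp_all
      · have hsplit : pvSplit (c :: rest) = (pvSplit rest).modifyHead (c :: ·) := by
          simp [pvSplit, hc]
        by_cases ha : pvAllowed c = true
        · rw [show pvRes (c :: rest) out buf = pvRes rest out (buf ++ [c]) by
              simp [pvRes, pvStep, hc, ha]]
          rw [ih]
          congr 2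
          simp only [pvSegs, hsplit]
          rw [pv_map_modifyHead _ (List.filter pvAllowed) (c :: ·) (c :: ·)
            (fun a => by simp [List.filter, ha])]
          rw [pv_modifyHead_comp]
          congr 1
          funext x
          simp
        · rw [show pvRes (c :: rest) out buf = pvRes rest out buf by
              simp [pvRes, pvStep, hc, ha]]
          rw [ih]
          congr 2
          simp only [pvSegs, hsplit]
          rw [pv_map_modifyHead _ (List.filter pvAllowed) (c :: ·) (fun x => x)
            (fun a => by simp [List.filter, ha])]
          rw [pv_modifyHead_id]

-- ===== VERDICT (by name: the statement is the Claim_ definition above) =====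
theorem normalize_pkg_name_spec : Claim_equal_normalize_pkg_name := by
  intro name _
  simp only [Spec_normalize_pkg_name, normalize_pkg_name, normalize_pkg_name_alt]
  have hmain := pv_main name.toList [] []
  simp only [pvRes] at hmain
  rw [hmain]
  rw [pv_splitOn_eq]
  congr 2
  rw [show pvSegs [] name.toList = (pvSplit name.toList).map (List.filter pvAllowed) by
    simp [pvSegs, pv_modifyHead_id]]
  simp only [pvF, List.map_map, List.nil_append]
  congr 1
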